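-- pv_equiv track=rewrite | github.com/SunnyMarkLiu/les-military-mrc-rank7 | utils/common.py | get_match_size
-- ===== SOURCE A (Python) =====
-- from collections import defaultdict
--
-- def get_match_size(cand_ngram: list, ref_ngram: list) -> (int, int):
--     ref_set = defaultdict(int)
--     cand_set = defaultdict(int)
--
--     for ngram in ref_ngram:
--         ref_set[ngram] += 1
--
--     for ngram in cand_ngram:
--         cand_set[ngram] += 1
--     match_size = 0
--     for ngram in cand_set:
--         match_size += min(cand_set[ngram], ref_set[ngram])
--     cand_size = len(cand_ngram)
--     return match_size, cand_size
-- ===== SOURCE B (Python) =====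
-- def get_match_size(cand_ngram: list, ref_ngram: list) -> (int, int):
--     avail = {}
--     for ngram in ref_ngram:
--         avail[ngram] = avail.get(ngram, 0) + 1
--     match_size = 0
--     for ngram in cand_ngram:
--         if avail.get(ngram, 0) > 0:
--             match_size += 1
--             avail[ngram] -= 1
--     return match_size, len(cand_ngram)
-- ===== Notes on version B (the rewrite author's own statement) =====
-- stated objective: simpler
-- what changed: Builds only the reference frequency table and counts matches in one consuming forward pass over the candidate, instead of building two frequency tables and summing min over the candidate's distinct keys.
import Mathlib
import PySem

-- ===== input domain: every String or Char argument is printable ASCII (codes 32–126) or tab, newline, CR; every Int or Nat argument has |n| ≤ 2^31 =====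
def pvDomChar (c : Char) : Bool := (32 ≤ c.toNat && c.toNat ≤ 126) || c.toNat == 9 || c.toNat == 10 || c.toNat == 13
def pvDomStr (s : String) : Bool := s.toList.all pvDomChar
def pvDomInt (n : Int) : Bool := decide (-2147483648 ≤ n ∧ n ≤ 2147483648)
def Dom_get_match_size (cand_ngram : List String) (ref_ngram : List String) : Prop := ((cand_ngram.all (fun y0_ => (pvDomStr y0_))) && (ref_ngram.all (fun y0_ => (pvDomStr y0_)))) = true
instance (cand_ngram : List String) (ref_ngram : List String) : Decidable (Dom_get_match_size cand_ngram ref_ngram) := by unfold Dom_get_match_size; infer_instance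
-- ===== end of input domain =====

-- B builds only the reference frequency table and counts matches in one consuming pass
-- over the candidate (simpler decomposition; same return value, proved equal below).

-- ===== PORT A =====
def get_match_size (cand_ngram : List String) (ref_ngram : List String) : Int × Int :=
  let ref_set := ref_ngram.foldl (fun d ngram => d.modify ngram 0 (· + 1)) PySem.Dict.empty
  let cand_set := cand_ngram.foldl (fun d ngram => d.modify ngram 0 (· + 1)) PySem.Dict.empty
  let match_size := cand_set.keys.foldl
    (fun m ngram => m + min (cand_set.getD ngram 0) (ref_set.getD ngram 0)) 0
  let cand_size : Int := cand_ngram.length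
  (match_size, cand_size)

-- ===== PORT B =====
def get_match_size_alt (cand_ngram : List String) (ref_ngram : List String) : Int × Int :=
  let avail := ref_ngram.foldl (fun d ngram => d.insert ngram (d.getD ngram 0 + 1)) PySem.Dict.empty
  let r := cand_ngram.foldl
    (fun (st : Int × PySem.Dict String Int) ngram =>
      if st.2.getD ngram 0 > 0 then (st.1 + 1, st.2.insert ngram (st.2.getD ngram 0 - 1)) else st)
    (0, avail)
  (r.1, (cand_ngram.length : Int))

-- ===== PRECONDITION & SPEC =====
def Spec_get_match_size (cand_ngram : List String) (ref_ngram : List String) (out : Int × Int) : Prop := out = get_match_size_alt cand_ngram ref_ngram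
instance (cand_ngram : List String) (ref_ngram : List String) (out : Int × Int) : Decidable (Spec_get_match_size cand_ngram ref_ngram out) := by unfold Spec_get_match_size; infer_instance

-- ===== CLAIM (what is proved, stated in full; the proofs are below) =====
def Claim_equal_get_match_size : Prop := ∀ (cand_ngram : List String) (ref_ngram : List String), Dom_get_match_size cand_ngram ref_ngram → Spec_get_match_size cand_ngram ref_ngram (get_match_size cand_ngram ref_ngram)

-- ===== LEMMAS AND PROOFS =====

-- abstract version of B's consuming pass: f gives the remaining availability of each ngram
def pvMatched : List String → (String → Int) → Int
  | [], _ => 0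
  | g :: t, f =>
    if f g > 0 then 1 + pvMatched t (fun h => if h = g then f g - 1 else f h)
    else pvMatched t f

-- B's fold computes pvMatched of the dict's availability function
theorem pvB_fold (L : List String) (m : Int) (d : PySem.Dict String Int) :
    (L.foldl
      (fun (st : Int × PySem.Dict String Int) ngram =>
        if st.2.getD ngram 0 > 0 then (st.1 + 1, st.2.insert ngram (st.2.getD ngram 0 - 1)) else st)
      (m, d)).1 = m + pvMatched L (fun g => d.getD g 0) := by
  induction L generalizing m d with
  | nil => simp [pvMatched]
  | cons g t ih =>
    simp only [List.foldl_cons, pvMatched]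
    by_cases h : d.getD g 0 > 0
    · simp only [h, if_pos]
      rw [ih]
      have hfun : (fun x => (d.insert g (d.getD g 0 - 1)).getD x 0)
           = (fun h' => if h' = g then d.getD g 0 - 1 else d.getD h' 0) := by
        funext x
        rw [PySem.Dict.getD_insert]
      rw [hfun]; ring
    · simp only [h, if_neg, not_false_iff]
      rw [ih]

-- splitting a sum over (g :: t).toFinset at g
theorem pvSum_cons (g : String) (t : List String) (h : String → Int) :
    ∑ x ∈ (g :: t).toFinset, h x = h g + ∑ x ∈ t.toFinset.erase g, h x := by
  rw [List.toFinset_cons]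
  by_cases hg : g ∈ t.toFinset
  · rw [Finset.insert_eq_self.mpr hg, ← Finset.add_sum_erase _ h hg]
  · rw [Finset.sum_insert hg, Finset.erase_eq_self.mpr hg]

-- splitting a sum over t.toFinset at g
theorem pvSum_split (g : String) (t : List String) (h : String → Int) :
    ∑ x ∈ t.toFinset, h x = (if g ∈ t then h g else 0) + ∑ x ∈ t.toFinset.erase g, h x := by
  by_cases hg : g ∈ t
  · rw [if_pos hg, ← Finset.add_sum_erase _ h (List.mem_toFinset.mpr hg)]
  · rw [if_neg hg, Finset.erase_eq_self.mpr (by simpa using hg), zero_add]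

theorem pvSum_erase_congr (g : String) (t : List String) (h k : String → Int)
    (hk : ∀ x, x ≠ g → h x = k x) :
    ∑ x ∈ t.toFinset.erase g, h x = ∑ x ∈ t.toFinset.erase g, k x := by
  apply Finset.sum_congr rfl
  intro x hx
  exact hk x (Finset.ne_of_mem_erase hx)

-- pvMatched equals the sum over distinct elements of min(count, availability)
theorem pvMatched_sum (L : List String) (f : String → Int) (hf : ∀ g, 0 ≤ f g) :
    pvMatched L f = ∑ g ∈ L.toFinset, min (L.count g : Int) (f g) := by
  induction L generalizing f with
  | nil => simp [pvMatched]
  | cons g t ih =>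
    have hcg : ((g :: t).count g : Int) = (t.count g : Int) + 1 := by
      simp
    have hcx : ∀ x, x ≠ g → ((g :: t).count x : Int) = (t.count x : Int) := by
      intro x hx
      have hb : (x == g) = false := by simp [hx]
      simp [List.count_cons]
      exact fun hgx => hx hgx.symm
    rw [pvSum_cons g t]
    rw [pvSum_erase_congr g t _ (fun x => min (t.count x : Int) (f x))
      (by intro x hx; rw [hcx x hx])]
    simp only [pvMatched]
    by_cases h : f g > 0
    · rw [if_pos h]
      have hf' : ∀ x, 0 ≤ (fun h' => if h' = g then f g - 1 else f h') x := by
        intro x; dsimp only; split_ifs with hx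
        · omega
        · exact hf x
      rw [ih _ hf']
      rw [pvSum_split g t]
      rw [pvSum_erase_congr g t _ (fun x => min (t.count x : Int) (f x))
        (by intro x hx; simp [hx])]
      by_cases hg : g ∈ t
      · rw [if_pos hg, hcg]
        simp only [if_true]
        omega
      · rw [if_neg hg]
        have : t.count g = 0 := List.count_eq_zero.mpr hg
        rw [hcg, this]
        push_cast
        omega
    · rw [if_neg h]
      have hg0 : f g = 0 := le_antisymm (not_lt.mp h) (hf g)
      rw [ih _ hf]
      rw [pvSum_split g t]
      by_cases hg : g ∈ t
      · rw [if_pos hg, hcg, hg0]; omega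
      · rw [if_neg hg]
        have : t.count g = 0 := List.count_eq_zero.mpr hg
        rw [hcg, this, hg0]
        push_cast
        omega

-- A's accumulation over the key list as a map-sum
theorem pvFoldl_add (ks : List String) (h : String → Int) (m : Int) :
    ks.foldl (fun acc x => acc + h x) m = m + (ks.map h).sum := by
  induction ks generalizing m with
  | nil => simp
  | cons x t ih => simp [List.foldl_cons, ih, add_assoc]

-- a nodup list with the same members as L sums like L.toFinset
theorem pvSum_ofList (L : List String) (h : String → Int) :
    ((PySem.Set.ofList L).map h).sum = ∑ x ∈ L.toFinset, h x := by
  have hfin : (PySem.Set.ofList L).toFinset = L.toFinset := by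
    apply Finset.ext
    intro x
    simp [List.mem_toFinset, PySem.Set.mem_ofList]
  rw [← hfin, List.sum_toFinset h (PySem.Set.nodup_ofList L)]

theorem pvA_fst (cand ref : List String) :
    (get_match_size cand ref).1 = ∑ x ∈ cand.toFinset, min ((cand.count x : Int)) ((ref.count x : Int)) := by
  show (PySem.Dict.counter cand).keys.foldl
      (fun m ngram => m + min ((PySem.Dict.counter cand).getD ngram 0) ((PySem.Dict.counter ref).getD ngram 0)) 0
    = _
  rw [pvFoldl_add, zero_add, PySem.Dict.keys_counter]
  have : (fun ngram => min ((PySem.Dict.counter cand).getD ngram 0) ((PySem.Dict.counter ref).getD ngram 0))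
       = (fun ngram => min ((cand.count ngram : Int)) ((ref.count ngram : Int))) := by
    funext x
    rw [PySem.Dict.getD_counter, PySem.Dict.getD_counter]
  rw [this, pvSum_ofList]

theorem pvB_fst (cand ref : List String) :
    (get_match_size_alt cand ref).1 = ∑ x ∈ cand.toFinset, min ((cand.count x : Int)) ((ref.count x : Int)) := by
  simp only [get_match_size_alt]
  rw [PySem.Dict.foldl_insert_getD_add_one_eq_counter, pvB_fold, zero_add]
  have : (fun g => (PySem.Dict.counter ref).getD g 0) = (fun g => (ref.count g : Int)) := by
    funext x; rw [PySem.Dict.getD_counter]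
  rw [this, pvMatched_sum _ _ (fun g => Int.natCast_nonneg _)]

-- ===== VERDICT (by name: the statement is the Claim_ definition above) =====
theorem get_match_size_spec : Claim_equal_get_match_size := by
  intro cand ref _
  show get_match_size cand ref = get_match_size_alt cand ref
  have h1 : (get_match_size cand ref).1 = (get_match_size_alt cand ref).1 :=
    (pvA_fst cand ref).trans (pvB_fst cand ref).symm
  have h2 : (get_match_size cand ref).2 = (get_match_size_alt cand ref).2 := rfl
  exact Prod.ext h1 h2
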